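-- pv_equiv track=rewrite | github.com/gslab-econ/gslab_make | gslab_make/tablefill.py | _parse_data
-- ===== SOURCE A (Python) =====
-- from itertools import chain
--
-- def _parse_data(data, null):
--     """.. Parse data from input.
--
--     Parameters
--     ----------
--     data : list
--         Input data to parse.
--     null : str
--         String to replace null characters.
--
--     Returns
--     -------
--     data : list
--         List of data values from input.
--     """
--     null_strings = ['', '.', 'NA']
--
--     data = [row.rstrip('\r\n') for row in data]
--     data = [row for row in data if row]
--     data = [row.split('\t') for row in data]
--     data = chain(*data)
--     data = [*data]
--     if (null != None):
--         data = [null if value in null_strings else value for value in data]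
--
--     return(data)
-- ===== SOURCE B (Python) =====
-- def _parse_data(data, null):
--     """Character-level scanner: instead of rstrip/split/chain, each row is
--     tokenized by one char loop after trimming trailing CR/LF by index."""
--     out = []
--     for row in data:
--         end = len(row)
--         while end and (row[end - 1] == '\r' or row[end - 1] == '\n'):
--             end -= 1
--         if end == 0:
--             continue  # row was empty after trimming
--         field = []
--         for i in range(end):
--             c = row[i]
--             if c == '\t':
--                 out.append(_emit(''.join(field), null))
--                 field = []
--             else:
--                 field.append(c)
--         out.append(_emit(''.join(field), null))
--     return out
--
-- def _emit(field, null):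
--     if null is not None and (field == '' or field == '.' or field == 'NA'):
--         return null
--     return field
-- ===== Notes on version B (the rewrite author's own statement) =====
-- stated objective: alternative
-- what changed: Replaces the rstrip/filter/split/chain comprehension pipeline with a character-level scanner: per row an index loop trims trailing CR/LF, then one char loop tokenizes on tabs and emits each field (with null substitution) directly, never calling rstrip/split/chain.
import Mathlib
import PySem

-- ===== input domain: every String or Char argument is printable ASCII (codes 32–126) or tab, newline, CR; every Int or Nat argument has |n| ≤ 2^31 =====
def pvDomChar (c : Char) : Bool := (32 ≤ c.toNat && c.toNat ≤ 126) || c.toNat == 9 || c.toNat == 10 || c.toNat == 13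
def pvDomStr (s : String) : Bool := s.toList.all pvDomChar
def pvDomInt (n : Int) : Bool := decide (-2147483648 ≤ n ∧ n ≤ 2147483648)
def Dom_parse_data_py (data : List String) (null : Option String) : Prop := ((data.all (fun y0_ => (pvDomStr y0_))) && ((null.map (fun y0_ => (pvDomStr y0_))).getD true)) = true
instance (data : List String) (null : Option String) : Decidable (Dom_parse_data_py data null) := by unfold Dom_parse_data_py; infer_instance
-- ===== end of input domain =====

-- B replaces A's rstrip/split/chain comprehension pipeline by a character-level scanner
-- (trim trailing CR/LF by index, then tokenize each row on tabs in one char loop); alternative, same O(n).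

-- ===== PORT A =====
-- hand port of row.rstrip('\r\n'): drop trailing characters that are '\r' or '\n'
-- (exact: Python's rstrip(chars) removes from the right every char contained in chars)
def pyRstripCRLF (s : String) : String :=
  String.ofList ((s.toList.reverse.dropWhile (fun c => c = '\r' || c = '\n')).reverse)

-- s.split('\t'): sep is the non-empty literal tab, so split? is always some
def pySplitTab (s : String) : List String :=
  (PySem.Str.split? s "\t").getD []

def pyNullStrings : List String := ["", ".", "NA"]

def parse_data_py (data : List String) (null : Option String) : List String :=
  let d1 := data.map (fun row => pyRstripCRLF row)
  let d2 := d1.filter (fun row => !row.toList.isEmpty)   -- 'if row': Python truthiness of a string = non-empty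
  let d3 := d2.map (fun row => pySplitTab row)
  let d4 := d3.flatten                                    -- chain(*data) then list(...)
  match null with                                         -- 'if (null != None)'
  | some n => d4.map (fun value => if value ∈ pyNullStrings then n else value)
  | none => d4

-- ===== PORT B =====
-- B's 'while end and row[end-1] in "\r\n": end -= 1' (then row[:end]) as structural
-- recursion from the right: a char is kept iff something after it is kept or it is not CR/LF
def pvTrimEnd (l : List Char) : List Char :=
  match l with
  | [] => []
  | c :: rest =>
    match pvTrimEnd rest with
    | [] => if c = '\r' || c = '\n' then [] else [c]
    | r => c :: r

-- B's _emit helper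
def pvEmit (field : String) (null : Option String) : String :=
  match null with
  | some n => if field = "" || field = "." || field = "NA" then n else field
  | none => field

-- B's inner char loop: accumulate the current field, flush on '\t', final flush at the end
def pvScan (null : Option String) (field : List Char) : List Char → List String
  | [] => [pvEmit (String.ofList field) null]
  | c :: cs =>
    if c = '\t' then pvEmit (String.ofList field) null :: pvScan null [] cs
    else pvScan null (field ++ [c]) cs

def parse_data_py_alt (data : List String) (null : Option String) : List String :=
  match data with
  | [] => []
  | row :: rest =>
    let t := pvTrimEnd row.toList
    if t.isEmpty then parse_data_py_alt rest null          -- 'if end == 0: continue'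
    else pvScan null [] t ++ parse_data_py_alt rest null

-- ===== PRECONDITION & SPEC =====
def Spec_parse_data_py (data : List String) (null : Option String) (out : List String) : Prop := out = parse_data_py_alt data null
instance (data : List String) (null : Option String) (out : List String) : Decidable (Spec_parse_data_py data null out) := by unfold Spec_parse_data_py; infer_instance

-- ===== CLAIM (what is proved, stated in full; the proofs are below) =====
def Claim_equal_parse_data_py : Prop := ∀ (data : List String) (null : Option String), Dom_parse_data_py data null → Spec_parse_data_py data null (parse_data_py data null)

-- ===== LEMMAS AND PROOFS =====

-- specification of splitting on a single char, used to relate both ports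
def pvSplitChar (c : Char) : List Char → List (List Char)
  | [] => [[]]
  | d :: rest =>
    if d = c then [] :: pvSplitChar c rest
    else
      match pvSplitChar c rest with
      | [] => [[d]]   -- unreachable: pvSplitChar is never []
      | f :: fs => (d :: f) :: fs

lemma pvSplitChar_ne_nil (c : Char) (l : List Char) : pvSplitChar c l ≠ [] := by
  induction l with
  | nil => simp [pvSplitChar]
  | cons d rest ih =>
    simp only [pvSplitChar]
    split
    · simp
    · split
      · simp
      · simp

-- prepend to the head piece
def pvConsHead (p : List Char) : List (List Char) → List (List Char)
  | [] => [p]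
  | f :: fs => (p ++ f) :: fs

lemma pvConsHead_nil (xs : List (List Char)) (h : xs ≠ []) : pvConsHead [] xs = xs := by
  cases xs with
  | nil => exact absurd rfl h
  | cons f fs => simp [pvConsHead]

lemma pvConsHead_consHead (p q : List Char) (xs : List (List Char)) (h : xs ≠ []) :
    pvConsHead p (pvConsHead q xs) = pvConsHead (p ++ q) xs := by
  cases xs with
  | nil => exact absurd rfl h
  | cons f fs => simp [pvConsHead]

lemma splitOn_go_char (c : Char) (l : List Char) : ∀ (fuel : Nat) (cur : List Char)
    (acc : List (List Char)), l.length < fuel →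
    PySem.Chars.splitOn.go [c] fuel l cur acc = acc.reverse ++ pvConsHead cur.reverse (pvSplitChar c l) := by
  induction l with
  | nil =>
    intro fuel cur acc h
    match fuel, h with
    | fuel + 1, _ =>
      simp [PySem.Chars.splitOn.go, pvSplitChar, pvConsHead]
  | cons d rest ih =>
    intro fuel cur acc h
    match fuel, h with
    | fuel + 1, h =>
      have hr : rest.length < fuel := by simpa using Nat.lt_of_succ_lt_succ h
      by_cases hd : d = c
      · have hpre : List.isPrefixOf [c] (d :: rest) = true := by
          simp [List.isPrefixOf, hd]
        rw [PySem.Chars.splitOn.go]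
        simp only [hpre, if_pos, List.drop, List.length_cons]
        simp only [List.length_nil, List.drop_zero]
        rw [ih fuel [] (cur.reverse :: acc) hr]
        simp only [List.reverse_nil]
        rw [pvConsHead_nil _ (pvSplitChar_ne_nil c rest)]
        simp [pvSplitChar, hd, pvConsHead, List.append_assoc]
      · have hpre : List.isPrefixOf [c] (d :: rest) = false := by
          simp [List.isPrefixOf]
          exact fun h' => hd h'.symm
        rw [PySem.Chars.splitOn.go]
        simp only [hpre, Bool.false_eq_true, if_false]
        rw [ih fuel (d :: cur) acc hr]
        simp only [List.reverse_cons, pvSplitChar, hd, if_false]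
        rw [← pvConsHead_consHead cur.reverse [d] _ (pvSplitChar_ne_nil c rest)]
        cases hx : pvSplitChar c rest with
        | nil => exact absurd hx (pvSplitChar_ne_nil c rest)
        | cons f fs => simp [pvConsHead]

lemma splitOn_char (c : Char) (l : List Char) :
    PySem.Chars.splitOn l [c] = pvSplitChar c l := by
  rw [PySem.Chars.splitOn, splitOn_go_char c l (l.length + 1) [] [] (Nat.lt_succ_self _)]
  simp [pvConsHead_nil _ (pvSplitChar_ne_nil c l)]

lemma pySplitTab_eq (s : String) :
    pySplitTab s = (pvSplitChar '\t' s.toList).map String.ofList := by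
  have : ("\t" : String).toList = ['\t'] := by decide
  simp [pySplitTab, PySem.Str.split?, PySem.Chars.split?, this, splitOn_char]

-- B's trim equals A's reverse/dropWhile/reverse rstrip
lemma pvTrimEnd_eq (l : List Char) :
    pvTrimEnd l = (l.reverse.dropWhile (fun c => c = '\r' || c = '\n')).reverse := by
  induction l with
  | nil => rfl
  | cons c rest ih =>
    simp only [pvTrimEnd, ih, List.reverse_cons, List.dropWhile_append]
    cases hx : ((rest.reverse.dropWhile (fun c => c = '\r' || c = '\n'))) with
    | nil =>
      simp only [List.isEmpty_nil, if_true, List.reverse_nil, List.dropWhile]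
      by_cases hc : (c = '\r' || c = '\n') = true
      · simp [hc]
      · simp [hc]
    | cons f fs =>
      simp

-- the per-field replacement A applies (for null = some n), as pvEmit
lemma pvEmit_eq_mem (n : String) (f : String) :
    pvEmit f (some n) = if f ∈ pyNullStrings then n else f := by
  simp only [pvEmit, pyNullStrings, List.mem_cons, List.not_mem_nil, or_false]
  by_cases h1 : f = "" <;> by_cases h2 : f = "." <;> by_cases h3 : f = "NA" <;>
    simp [h1, h2, h3]

-- B's char loop computes the mapped tab-split of its input
lemma pvScan_eq (null : Option String) (l : List Char) : ∀ (field : List Char),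
    pvScan null field l = (pvConsHead field (pvSplitChar '\t' l)).map (fun f => pvEmit (String.ofList f) null) := by
  induction l with
  | nil => intro field; simp [pvScan, pvSplitChar, pvConsHead]
  | cons c cs ih =>
    intro field
    by_cases hc : c = '\t'
    · simp only [pvScan, hc, if_pos, pvSplitChar]
      rw [ih [], pvConsHead_nil _ (pvSplitChar_ne_nil '\t' cs)]
      cases hx : pvSplitChar '\t' cs with
      | nil => exact absurd hx (pvSplitChar_ne_nil '\t' cs)
      | cons f fs => simp [pvConsHead]
    · simp only [pvScan, hc, if_false, pvSplitChar]
      rw [ih (field ++ [c]),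
        ← pvConsHead_consHead field [c] _ (pvSplitChar_ne_nil '\t' cs)]
      cases hx : pvSplitChar '\t' cs with
      | nil => exact absurd hx (pvSplitChar_ne_nil '\t' cs)
      | cons f fs => simp [pvConsHead]

lemma pvScan_nil_eq (null : Option String) (l : List Char) :
    pvScan null [] l = (pvSplitChar '\t' l).map (fun f => pvEmit (String.ofList f) null) := by
  rw [pvScan_eq, pvConsHead_nil _ (pvSplitChar_ne_nil '\t' l)]

lemma toList_ofList (l : List Char) : (String.ofList l).toList = l := by
  simp

theorem parse_data_py_eq (data : List String) (null : Option String) :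
    parse_data_py data null = parse_data_py_alt data null := by
  induction data with
  | nil => cases null <;> rfl
  | cons row rest ih =>
    have htrim : pvTrimEnd row.toList = (pyRstripCRLF row).toList := by
      rw [pvTrimEnd_eq, pyRstripCRLF, toList_ofList]
    by_cases h : (pyRstripCRLF row).toList.isEmpty
    · have ht : (pvTrimEnd row.toList).isEmpty = true := by rw [htrim]; exact h
      rw [parse_data_py_alt]
      simp only [ht, if_pos, ← ih]
      cases null <;> simp_all [parse_data_py]
    · have ht : ¬ (pvTrimEnd row.toList).isEmpty = true := by rw [htrim]; exact h
      rw [parse_data_py_alt]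
      simp only [ht, ← ih]
      have hsplit : pvScan null [] (pvTrimEnd row.toList)
          = (pySplitTab (pyRstripCRLF row)).map (fun f => pvEmit f null) := by
        rw [htrim, pvScan_nil_eq, pySplitTab_eq]
        simp only [List.map_map]
        rfl
      cases null with
      | none =>
        simp_all [parse_data_py, pvEmit]
      | some n =>
        simp_all [parse_data_py, pvEmit_eq_mem]

-- ===== VERDICT (by name: the statement is the Claim_ definition above) =====
theorem parse_data_py_spec : Claim_equal_parse_data_py := by
  intro data null _
  exact parse_data_py_eq data null
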